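-- pv_equiv track=rewrite | github.com/engrsmab/OfficeApp-PyQt-5 | Backend.py | match_numbers
-- ===== SOURCE A (Python) =====
-- def match_numbers(entry,data):
--     total_len = len(data)
--     count = 0
--     for digit in entry:
--         if count <= total_len and len(entry) <= total_len:
--             if data[count] == digit:
--                 count+=1
--     if count >= total_len//2 and count == len(entry):
--         return True
--     else:
--         return False
-- ===== SOURCE B (Python) =====
-- def match_numbers(entry, data):
--     n = len(entry)
--     return n >= len(data) // 2 and data[:n] == entry
-- ===== Notes on version B (the rewrite author's own statement) =====
-- stated objective: simpler
-- what changed: Replaced A's guarded pointer-advancing loop and final counter test by a direct one-line check: entry is a prefix of data (slice equality) and len(entry) >= len(data)//2.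
import Mathlib
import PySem

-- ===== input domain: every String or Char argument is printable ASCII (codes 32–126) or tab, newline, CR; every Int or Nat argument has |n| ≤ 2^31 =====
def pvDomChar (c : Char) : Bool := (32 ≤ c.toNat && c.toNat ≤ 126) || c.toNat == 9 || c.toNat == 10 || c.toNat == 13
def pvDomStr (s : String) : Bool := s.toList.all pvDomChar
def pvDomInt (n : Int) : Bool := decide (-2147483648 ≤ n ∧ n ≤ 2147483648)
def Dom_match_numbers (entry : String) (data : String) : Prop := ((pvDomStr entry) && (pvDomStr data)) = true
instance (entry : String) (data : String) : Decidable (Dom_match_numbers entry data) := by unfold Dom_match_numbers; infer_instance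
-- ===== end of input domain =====

-- B replaces A's guarded pointer-advancing loop by a direct prefix-plus-half-length check (objective: simpler).

-- ===== PORT A =====
-- loop body of A's 'for digit in entry'
def stepA (entry data : String) (count : Int) (digit : Char) : Int :=
  if count ≤ PySem.Str.len data ∧ PySem.Str.len entry ≤ PySem.Str.len data then
    (if PySem.Str.pyGet? data count = some digit then count + 1 else count)
  else count

def match_numbers (entry : String) (data : String) : Bool :=
  let total_len : Int := PySem.Str.len data
  let count : Int := entry.toList.foldl (stepA entry data) 0
  if count ≥ PySem.Int.floordiv total_len 2 ∧ count = PySem.Str.len entry then true else false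

-- ===== PORT B =====
def match_numbers_alt (entry : String) (data : String) : Bool :=
  let n : Int := PySem.Str.len entry
  decide (n ≥ PySem.Int.floordiv (PySem.Str.len data) 2) && decide (PySem.Str.slice data none (some n) = entry)

-- ===== PRECONDITION & SPEC =====
def Spec_match_numbers (entry : String) (data : String) (out : Bool) : Prop := out = match_numbers_alt entry data
instance (entry : String) (data : String) (out : Bool) : Decidable (Spec_match_numbers entry data out) := by unfold Spec_match_numbers; infer_instance

-- ===== CLAIM (what is proved, stated in full; the proofs are below) =====
def Claim_equal_match_numbers : Prop := ∀ (entry : String) (data : String), Dom_match_numbers entry data → Spec_match_numbers entry data (match_numbers entry data)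

-- ===== LEMMAS AND PROOFS =====

-- When len(entry) > len(data) the outer guard is false at every step, so the loop leaves count at its start value.
lemma loopA_guard_false (entry data : String)
    (hE : ¬ PySem.Str.len entry ≤ PySem.Str.len data) (l : List Char) (c : Int) :
    l.foldl (stepA entry data) c = c := by
  induction l generalizing c with
  | nil => rfl
  | cons a l ih => rw [List.foldl_cons, stepA, if_neg (by tauto)]; exact ih c

-- Characterisation of A's loop when len(entry) ≤ len(data): starting at a natural c with
-- c + l.length ≤ len(data), the final count equals c + l.length iff l matches data at offset c,
-- and the final count is always a natural number ≤ c + l.length.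
lemma loopA_char (entry data : String)
    (hE : PySem.Str.len entry ≤ PySem.Str.len data) :
    ∀ (l : List Char) (c : Nat), c + l.length ≤ data.toList.length →
      ((l.foldl (stepA entry data) (c : Int) = (c : Int) + l.length) ↔
        (data.toList.drop c).take l.length = l)
      ∧ ∃ r : Nat, l.foldl (stepA entry data) (c : Int) = (r : Int) ∧ r ≤ c + l.length := by
  intro l
  induction l with
  | nil =>
    intro c _
    refine ⟨by simp, ⟨c, by simp⟩⟩
  | cons a l ih =>
    intro c hc
    have hclt : c < data.toList.length := by simp only [List.length_cons] at hc; omega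
    have hclt' : c < data.length := by simpa using hclt
    have hguard : (c : Int) ≤ PySem.Str.len data ∧ PySem.Str.len entry ≤ PySem.Str.len data := by
      refine ⟨?_, hE⟩
      rw [PySem.Str.len_eq]
      exact_mod_cast Nat.le_of_lt hclt'
    have hget : PySem.Str.pyGet? data (c : Int) = some data.toList[c] := by
      rw [PySem.Str.pyGet?_natCast]
      exact List.getElem?_eq_getElem hclt
    have hdrop : data.toList.drop c = data.toList[c] :: data.toList.drop (c + 1) :=
      List.drop_eq_getElem_cons hclt
    by_cases hmatch : data.toList[c] = a
    · -- match: count advances to c+1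
      have hstep : List.foldl (stepA entry data) ((c : Int)) (a :: l)
          = List.foldl (stepA entry data) (((c + 1 : Nat) : Int)) l := by
        rw [List.foldl_cons, stepA, if_pos hguard, hget, hmatch, if_pos rfl]
        push_cast; ring_nf
      obtain ⟨hiff, r, hr, hrle⟩ := ih (c + 1) (by simp only [List.length_cons] at hc; omega)
      rw [hstep]
      refine ⟨?_, ⟨r, hr, by simp only [List.length_cons]; omega⟩⟩
      rw [hdrop, hmatch]
      constructor
      · intro h
        have heq : ((c + 1 : Nat) : Int) + l.length = (c : Int) + (a :: l).length := by
          simp only [List.length_cons]; push_cast; ring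
        rw [← heq] at h
        have ht := hiff.mp h
        simp only [List.length_cons, List.take_succ_cons]
        rw [ht]
      · intro h
        simp only [List.length_cons, List.take_succ_cons, List.cons.injEq] at h
        have ht := hiff.mpr h.2
        rw [ht]
        simp only [List.length_cons]; push_cast; ring
    · -- mismatch: count stays at c
      have hstep : List.foldl (stepA entry data) ((c : Int)) (a :: l)
          = List.foldl (stepA entry data) ((c : Int)) l := by
        rw [List.foldl_cons, stepA, if_pos hguard, hget, if_neg (by simpa using hmatch)]
      obtain ⟨_, r, hr, hrle⟩ := ih c (by simp only [List.length_cons] at hc; omega)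
      rw [hstep]
      refine ⟨?_, ⟨r, hr, by simp only [List.length_cons]; omega⟩⟩
      constructor
      · intro h
        rw [hr] at h
        exfalso
        have h1 : (r : Int) ≤ (c : Int) + l.length := by exact_mod_cast hrle
        simp only [List.length_cons] at h
        push_cast at h
        omega
      · intro h
        rw [hdrop] at h
        simp only [List.length_cons, List.take_succ_cons, List.cons.injEq] at h
        exact absurd h.1 hmatch

lemma string_eq_iff_toList (s t : String) : s = t ↔ s.toList = t.toList :=
  ⟨fun h => by rw [h], fun h => by
    rw [← String.ofList_toList (s := s), ← String.ofList_toList (s := t), h]⟩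

-- B's slice test, read on the list side
lemma slice_eq_iff (entry data : String) :
    (PySem.Str.slice data none (some (PySem.Str.len entry)) = entry) ↔
      data.toList.take entry.toList.length = entry.toList := by
  rw [string_eq_iff_toList]
  have hn : PySem.Str.len entry = ((entry.toList.length : Nat) : Int) := by
    rw [PySem.Str.len_eq, String.length_toList]
  rw [hn]
  have h1 : (PySem.Str.slice data none (some ((entry.toList.length : Nat) : Int))).toList
      = data.toList.take entry.toList.length := by
    simp [PySem.Str.toList_slice, PySem.Chars.slice, PySem.List.slice_to_natCast]
  rw [h1]

-- ===== VERDICT (by name: the statement is the Claim_ definition above) =====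
theorem match_numbers_spec : Claim_equal_match_numbers := by
  intro entry data _
  unfold Spec_match_numbers match_numbers match_numbers_alt
  rw [Bool.eq_iff_iff]
  simp only [ge_iff_le, decide_eq_true_eq, Bool.and_eq_true, ite_eq_iff]
  have hEnt : PySem.Str.len entry = (entry.toList.length : Int) := by
    rw [PySem.Str.len_eq, String.length_toList]
  have hDat : PySem.Str.len data = (data.toList.length : Int) := by
    rw [PySem.Str.len_eq, String.length_toList]
  by_cases hE : PySem.Str.len entry ≤ PySem.Str.len data
  · have hlen : entry.toList.length ≤ data.toList.length := by
      rw [hEnt, hDat] at hE; exact_mod_cast hE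
    obtain ⟨hiff, r, hr, hrle⟩ :=
      loopA_char entry data hE entry.toList 0 (by simpa using hlen)
    simp only [Nat.cast_zero, zero_add, List.drop_zero] at hiff hr hrle
    rw [slice_eq_iff, hEnt]
    by_cases hfull : (entry.toList.foldl (stepA entry data) 0) = (entry.toList.length : Int)
    · have hpre := hiff.mp hfull
      rw [hfull]
      tauto
    · have hpre : ¬ data.toList.take entry.toList.length = entry.toList :=
        fun h => hfull (hiff.mpr h)
      tauto
  · -- len(entry) > len(data): the guard is always false, count = 0; both sides are false
    have hloop := loopA_guard_false entry data hE entry.toList 0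
    have hlen : data.toList.length < entry.toList.length := by
      rw [hEnt, hDat] at hE; omega
    have hne : ¬ PySem.Str.slice data none (some (PySem.Str.len entry)) = entry := by
      rw [slice_eq_iff, List.take_of_length_le (Nat.le_of_lt hlen)]
      intro h
      have := congrArg List.length h
      omega
    have hcount : ¬ ((0 : Int) = PySem.Str.len entry) := by
      rw [hEnt]
      intro h
      omega
    rw [hloop]
    tauto
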